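-- pv_equiv track=rewrite | github.com/hzee97/Programmers | PCCP/모의고사 1회/[PCCP 모의고사 1] 1번.py | solution
-- ===== SOURCE A (Python) =====
-- def solution(input_string):
--     answer = ''
--
--     alpha=[]
--     for i in input_string:
--         if len(alpha)==0:
--             alpha.append(i)
--         else:
--             if alpha[-1]!=i:
--                 alpha.append(i)
--             else:
--                 continue
--
--     set_alpha=set(alpha)
--
--     alone=[]   # 외톨이 알파벳
--     for i in set_alpha:
--         if alpha.count(i)>1:
--             alone.append(i)
--
--     # 외톨이 알파벳이 없다면 문자열 "N"을 return.
--     if len(alone)==0: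
--         answer+='N'
--     # 외톨이 알파벳이 있다면 외톨이 알파벳들을 알파벳순으로 이어 붙이기.
--     else:
--         alone.sort()
--         for i in alone:
--             answer+=i
--
--     return answer
-- ===== SOURCE B (Python) =====
-- def solution(input_string):
--     prev = None
--     started = set()
--     lonely = set()
--     for ch in input_string:
--         if ch != prev:
--             if ch in started:
--                 lonely.add(ch)
--             else:
--                 started.add(ch)
--             prev = ch
--     return ''.join(sorted(lonely)) or 'N'
-- ===== Notes on version B (the rewrite author's own statement) =====
-- stated objective: faster
-- what changed: B replaces A's three phases (collapse consecutive runs into a list, deduplicate it, count each distinct char's occurrences in the collapsed list) by a single pass over the string that detects each run start and moves a char into a result set the moment it starts its second run, then sorts that set.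
import Mathlib
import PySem

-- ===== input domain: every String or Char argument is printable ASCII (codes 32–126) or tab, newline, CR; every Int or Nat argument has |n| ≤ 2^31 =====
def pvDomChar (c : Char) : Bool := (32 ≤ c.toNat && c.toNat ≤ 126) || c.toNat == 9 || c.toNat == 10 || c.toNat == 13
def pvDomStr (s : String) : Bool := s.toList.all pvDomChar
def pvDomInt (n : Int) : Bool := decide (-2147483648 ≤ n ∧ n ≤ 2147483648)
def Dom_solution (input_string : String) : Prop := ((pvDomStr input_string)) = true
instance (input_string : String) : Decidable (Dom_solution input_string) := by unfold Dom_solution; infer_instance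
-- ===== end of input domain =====

-- B replaces A's run-collapsed list plus per-character counting pass by a single pass over the
-- string that records run starts in two sets, removing the per-distinct-char count scans (measured faster in a timing run).
-- A iterates over a Python set only to build a list that is then sorted, so the result does not
-- depend on the unmodelled hash iteration order; the port uses the Set's insertion order.

-- ===== PORT A =====
def solution (input_string : String) : String :=
  let alpha : List Char := input_string.toList.foldl (fun alpha i =>
    if alpha.length = 0 then alpha ++ [i]
    else if PySem.List.pyGet? alpha (-1) ≠ some i then alpha ++ [i]
    else alpha) []
  let set_alpha : PySem.Set Char := PySem.Set.ofList alpha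
  let alone : List Char := set_alpha.foldl (fun alone i =>
    if alpha.count i > 1 then alone ++ [i] else alone) []
  if alone.length = 0 then "N"
  else String.ofList (PySem.List.sorted alone (fun x => x) false)

-- ===== PORT B =====
def solution_alt (input_string : String) : String :=
  let st := input_string.toList.foldl
    (fun (st : Option Char × PySem.Set Char × PySem.Set Char) ch =>
      let (prev, started, lonely) := st
      if (match prev with | none => true | some p => ch ≠ p) then
        if PySem.Set.contains started ch then (some ch, started, PySem.Set.add lonely ch)
        else (some ch, PySem.Set.add started ch, lonely)
      else st)
    (none, PySem.Set.empty, PySem.Set.empty)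
  let j := String.ofList (PySem.List.sorted st.2.2 (fun x => x) false)
  if j = "" then "N" else j

-- ===== PRECONDITION & SPEC =====
def Spec_solution (input_string : String) (out : String) : Prop := out = solution_alt input_string
instance (input_string : String) (out : String) : Decidable (Spec_solution input_string out) := by unfold Spec_solution; infer_instance

-- ===== CLAIM (what is proved, stated in full; the proofs are below) =====
def Claim_equal_solution : Prop := ∀ (input_string : String), Dom_solution input_string → Spec_solution input_string (solution input_string)

-- ===== LEMMAS AND PROOFS =====

def pvStepA (alpha : List Char) (i : Char) : List Char :=
  if alpha.length = 0 then alpha ++ [i]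
  else if PySem.List.pyGet? alpha (-1) ≠ some i then alpha ++ [i]
  else alpha

def pvStepB (st : Option Char × PySem.Set Char × PySem.Set Char) (ch : Char) :
    Option Char × PySem.Set Char × PySem.Set Char :=
  let (prev, started, lonely) := st
  if (match prev with | none => true | some p => ch ≠ p) then
    if PySem.Set.contains started ch then (some ch, started, PySem.Set.add lonely ch)
    else (some ch, PySem.Set.add started ch, lonely)
  else st

theorem pvCount_append_singleton (l : List Char) (a c : Char) :
    (l ++ [a]).count c = l.count c + (if c = a then 1 else 0) := by
  rw [List.count_append]
  by_cases h : c = a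
  · simp [h]
  · rw [List.count_eq_zero.mpr (by simp [h] : c ∉ [a])]; simp [h]

/-- Invariant linking A's collapsed run list to B's state. -/
def pvInv (alpha : List Char) (st : Option Char × PySem.Set Char × PySem.Set Char) : Prop :=
  st.1 = alpha.getLast? ∧
  st.2.1.Nodup ∧ (∀ c, c ∈ st.2.1 ↔ c ∈ alpha) ∧
  st.2.2.Nodup ∧ (∀ c, c ∈ st.2.2 ↔ 2 ≤ alpha.count c)

theorem pvInv_step (alpha : List Char) (st : Option Char × PySem.Set Char × PySem.Set Char)
    (h : pvInv alpha st) (i : Char) : pvInv (pvStepA alpha i) (pvStepB st i) := by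
  obtain ⟨st1, st2, st3⟩ := st
  obtain ⟨hp, hsn, hsm, hln, hlm⟩ := h
  simp only at hp hsn hsm hln hlm
  rcases alpha.eq_nil_or_concat with rfl | ⟨pre, p, halpha⟩
  · -- alpha = []
    have hst2 : st2 = [] := List.eq_nil_iff_forall_not_mem.mpr
      (fun c hc => by simpa using (hsm c).mp hc)
    have hst3 : st3 = [] := List.eq_nil_iff_forall_not_mem.mpr
      (fun c hc => by have := (hlm c).mp hc; simp at this)
    have hst1 : st1 = none := by simpa using hp
    subst hst1 hst2 hst3
    have e1 : pvStepA [] i = [i] := rfl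
    have e2 : pvStepB (none, ([] : List Char), ([] : List Char)) i = (some i, [i], []) := rfl
    rw [e1, e2]
    refine ⟨by simp, by simp, by simp, by simp, fun c => ?_⟩
    by_cases hci : c = i
    · subst hci; rw [List.count_singleton]; simp
    · rw [List.count_eq_zero.mpr (by simp [hci] : c ∉ [i])]; simp
  · rw [List.concat_eq_append] at halpha; subst halpha
    have hp' : st1 = some p := by simpa using hp
    subst hp'
    have hlast : PySem.List.pyGet? (pre ++ [p]) (-1) = some p :=
      PySem.List.pyGet?_neg_one_append_singleton pre p
    by_cases hip : i = p
    · subst hip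
      have e1 : pvStepA (pre ++ [i]) i = pre ++ [i] := by simp [pvStepA, hlast]
      have e2 : pvStepB (some i, st2, st3) i = (some i, st2, st3) := by simp [pvStepB]
      rw [e1, e2]
      exact ⟨hp, hsn, hsm, hln, hlm⟩
    · have hpi : ¬ p = i := fun h => hip h.symm
      have e1 : pvStepA (pre ++ [p]) i = (pre ++ [p]) ++ [i] := by
        simp [pvStepA, hlast, hpi]
      rw [e1]
      have hcnt : ∀ c, ((pre ++ [p]) ++ [i]).count c =
          (pre ++ [p]).count c + (if c = i then 1 else 0) :=
        fun c => pvCount_append_singleton (pre ++ [p]) i c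
      by_cases hmem : i ∈ pre ++ [p]
      · have him : i ∈ st2 := (hsm i).mpr hmem
        have hc : PySem.Set.contains st2 i = true := by
          rw [PySem.Set.contains_iff]; exact him
        have e2 : pvStepB (some p, st2, st3) i = (some i, st2, PySem.Set.add st3 i) := by
          simp only [pvStepB]
          rw [if_pos (by simp [hip]), if_pos hc]
        rw [e2]
        refine ⟨by simp, hsn, fun c => ?_, PySem.Set.nodup_add _ i hln, fun c => ?_⟩
        · rw [hsm c]
          constructor
          · intro h; exact List.mem_append_left _ h
          · intro h
            rcases List.mem_append.mp h with h | h
            · exact h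
            · exact (List.mem_singleton.mp h) ▸ hmem
        · rw [PySem.Set.mem_add, hlm c, hcnt c]
          by_cases hci : c = i
          · subst hci
            rw [if_pos rfl]
            have h1 : 1 ≤ (pre ++ [p]).count c := List.one_le_count_iff.mpr hmem
            constructor
            · intro _; omega
            · intro _; exact Or.inr rfl
          · rw [if_neg hci, add_zero]
            constructor
            · rintro (h | h)
              · exact h
              · exact absurd h hci
            · intro h; exact Or.inl h
      · have hnotin : i ∉ st2 := fun h => hmem ((hsm i).mp h)
        have e2 : pvStepB (some p, st2, st3) i = (some i, PySem.Set.add st2 i, st3) := by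
          simp only [pvStepB]
          rw [if_pos (by simp [hip]), if_neg (by simp [hnotin])]
        rw [e2]
        refine ⟨by simp, PySem.Set.nodup_add _ i hsn, fun c => ?_, hln, fun c => ?_⟩
        · rw [PySem.Set.mem_add, hsm c]
          simp only [List.mem_append, List.mem_singleton]
        · rw [hlm c, hcnt c]
          by_cases hci : c = i
          · subst hci
            have h0 : (pre ++ [p]).count c = 0 := List.count_eq_zero.mpr hmem
            rw [h0, if_pos rfl]
            constructor <;> intro h <;> omega
          · rw [if_neg hci, add_zero]

theorem pvInv_foldl (l : List Char) (alpha : List Char)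
    (st : Option Char × PySem.Set Char × PySem.Set Char) (h : pvInv alpha st) :
    pvInv (l.foldl pvStepA alpha) (l.foldl pvStepB st) := by
  induction l generalizing alpha st with
  | nil => exact h
  | cons x xs ih => exact ih _ _ (pvInv_step _ _ h x)

-- ===== VERDICT (by name: the statement is the Claim_ definition above) =====
theorem solution_spec : Claim_equal_solution := by
  intro s _
  unfold Spec_solution solution solution_alt
  set l := s.toList with hl
  have hfold := pvInv_foldl l [] (none, PySem.Set.empty, PySem.Set.empty)
    ⟨rfl, List.nodup_nil, by simp [PySem.Set.empty], List.nodup_nil, by simp [PySem.Set.empty]⟩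
  set alpha := l.foldl pvStepA [] with ha
  set st := l.foldl pvStepB (none, PySem.Set.empty, PySem.Set.empty) with hst
  obtain ⟨-, -, -, hln, hlm⟩ := hfold
  have eA : l.foldl (fun alpha i =>
      if alpha.length = 0 then alpha ++ [i]
      else if PySem.List.pyGet? alpha (-1) ≠ some i then alpha ++ [i]
      else alpha) [] = alpha := rfl
  have eB : l.foldl
      (fun (st : Option Char × PySem.Set Char × PySem.Set Char) ch =>
        let (prev, started, lonely) := st
        if (match prev with | none => true | some p => ch ≠ p) then
          if PySem.Set.contains started ch then (some ch, started, PySem.Set.add lonely ch)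
          else (some ch, PySem.Set.add started ch, lonely)
        else st)
      (none, PySem.Set.empty, PySem.Set.empty) = st := rfl
  simp only [eA, eB]
  have ealone : (PySem.Set.ofList alpha).foldl
      (fun alone i => if alpha.count i > 1 then alone ++ [i] else alone) [] =
      (PySem.Set.ofList alpha).filter (fun i => alpha.count i > 1) := by
    simpa using PySem.List.foldl_append_if_eq_filter
      (l := PySem.Set.ofList alpha) (p := fun i => alpha.count i > 1) (acc := [])
  rw [ealone]
  set alone := (PySem.Set.ofList alpha).filter (fun i => alpha.count i > 1) with halone
  have haln : alone.Nodup := (PySem.Set.nodup_ofList alpha).filter _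
  have halm : ∀ c, c ∈ alone ↔ 2 ≤ alpha.count c := by
    intro c
    simp only [halone, List.mem_filter, PySem.Set.mem_ofList, decide_eq_true_eq, gt_iff_lt]
    constructor
    · rintro ⟨-, h⟩; omega
    · intro h; exact ⟨List.one_le_count_iff.mp (by omega), by omega⟩
  have hperm : alone.Perm st.2.2 := by
    rw [List.perm_ext_iff_of_nodup haln hln]
    intro c; rw [halm c, hlm c]
  have hsorted : PySem.List.sorted alone (fun x => x) false =
      PySem.List.sorted st.2.2 (fun x => x) false :=
    PySem.List.sorted_eq_sorted_of_perm alone st.2.2 (fun x => x) (fun _ _ h => h) hperm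
  rw [← hsorted]
  by_cases hnil : alone = []
  · rw [hnil]
    simp [PySem.List.sorted]
  · have h1 : ¬ alone.length = 0 := by simpa [List.length_eq_zero_iff] using hnil
    have h2 : PySem.List.sorted alone (fun x => x) false ≠ [] := by
      rw [Ne, PySem.List.sorted_eq_nil_iff]; exact hnil
    have h3 : String.ofList (PySem.List.sorted alone (fun x => x) false) ≠ "" := by
      intro h; exact h2 (by simpa using congrArg String.toList h)
    rw [if_neg h1, if_neg h3]
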